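-- pv_equiv track=rewrite | github.com/Sosohy/algorithm_study | 프로그래머스/lv3/12987. 숫자 게임/숫자 게임.py | solution
-- ===== SOURCE A (Python) =====
-- def solution(A, B):
--     answer = 0
--     A.sort()
--     B.sort()
--
--     while(A):
--         aNum = A.pop()
--
--         bNum = 0
--         if(B[-1] > aNum):
--             bNum = B.pop()
--             answer += 1
--         else:
--             bNum = B.pop(0)
--
--     return answer
-- ===== SOURCE B (Python) =====
-- def solution(A, B):
--     As = sorted(A)
--     Bs = sorted(B)
--     answer = 0
--     lo = 0
--     hi = len(Bs) - 1
--     for a in reversed(As):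
--         if Bs[hi] > a:
--             answer += 1
--             hi -= 1
--         else:
--             lo += 1
--     return answer
-- ===== Notes on version B (the rewrite author's own statement) =====
-- stated objective: alternative
-- what changed: Replaces A's destructive loop (pop() and O(n) pop(0) on both lists) with two index pointers walking the sorted arrays once, avoiding element shifting; B also leaves the caller's lists unmutated (measured speedup did not reach the 1.5x bar, sorting dominates both).
import Mathlib
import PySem

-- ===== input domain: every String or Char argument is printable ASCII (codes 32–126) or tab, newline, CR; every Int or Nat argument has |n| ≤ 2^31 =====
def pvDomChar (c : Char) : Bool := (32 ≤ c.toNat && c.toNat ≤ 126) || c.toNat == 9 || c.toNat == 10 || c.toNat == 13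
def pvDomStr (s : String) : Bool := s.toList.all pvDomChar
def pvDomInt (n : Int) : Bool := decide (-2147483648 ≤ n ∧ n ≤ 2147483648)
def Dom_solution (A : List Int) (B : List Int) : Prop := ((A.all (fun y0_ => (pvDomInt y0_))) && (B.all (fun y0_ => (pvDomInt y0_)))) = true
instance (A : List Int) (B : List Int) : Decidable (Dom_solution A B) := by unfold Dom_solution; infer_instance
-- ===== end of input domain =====

-- B replaces A's destructive pop()/O(n) pop(0) loop by two index pointers over the sorted arrays
-- (no element shifting; B does not mutate its arguments, while Python A sorts and empties the
-- caller's lists — the equivalence proved here is about the return value only).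

-- ===== PORT A =====
-- while(A): pop A's last; if B[-1] > it, pop B's last and count, else pop B's first.
-- Popping from the end of sorted A = consuming (sorted A).reverse head-first.
def solLoopA : List Int → List Int → Int → Int
  | [], _, answer => answer
  | aNum :: rest, B, answer =>
    if PySem.List.pyGetD B (-1) 0 > aNum then
      solLoopA rest B.dropLast (answer + 1)
    else
      solLoopA rest B.tail answer

def solution (A : List Int) (B : List Int) : Int :=
  solLoopA (PySem.List.sorted A (fun x => x) false).reverse
           (PySem.List.sorted B (fun x => x) false) 0

-- ===== PORT B =====
-- loop body of Source B: state (answer, lo, hi)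
def altStep (Bs : List Int) (st : Int × Int × Int) (a : Int) : Int × Int × Int :=
  if PySem.List.pyGetD Bs st.2.2 0 > a then (st.1 + 1, st.2.1, st.2.2 - 1)
  else (st.1, st.2.1 + 1, st.2.2)

def solution_alt (A : List Int) (B : List Int) : Int :=
  let As := PySem.List.sorted A (fun x => x) false
  let Bs := PySem.List.sorted B (fun x => x) false
  (As.reverse.foldl (altStep Bs) (0, 0, PySem.List.len Bs - 1)).1

-- ===== PRECONDITION & SPEC =====
-- Excludes exactly the inputs where Python A raises IndexError: when len(A) > len(B) the loop
-- exhausts B while A still has elements, so B[-1] / B.pop() fail.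
def Pre_solution (A : List Int) (B : List Int) : Prop := A.length ≤ B.length
instance (A : List Int) (B : List Int) : Decidable (Pre_solution A B) := by unfold Pre_solution; infer_instance
def pvWitness_solution : List Int × List Int := ([3, 1, 2], [4, 3, 1])

def Spec_solution (A : List Int) (B : List Int) (out : Int) : Prop := out = solution_alt A B
instance (A : List Int) (B : List Int) (out : Int) : Decidable (Spec_solution A B out) := by unfold Spec_solution; infer_instance

-- ===== CLAIM (what is proved, stated in full; the proofs are below) =====
def Claim_equal_solution : Prop := ∀ (A : List Int) (B : List Int), Dom_solution A B → Pre_solution A B → Spec_solution A B (solution A B)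

-- ===== LEMMAS AND PROOFS =====

-- (take i l).dropLast = take (i-1) l also when i = l.length (library dropLast_take needs i < length)
lemma dropLast_take_le {α : Type} {i : Nat} {l : List α} (h : i ≤ l.length) :
    (l.take i).dropLast = l.take (i - 1) := by
  rcases Nat.lt_or_ge i l.length with hlt | hge
  · exact List.dropLast_take hlt
  · have : i = l.length := le_antisymm h hge
    subst this
    simp [List.dropLast_eq_take]

-- last element of the live segment Bs[lo..hi] is Bs[hi]
lemma seg_last (Bs : List Int) (lo hi : Int) (h0 : 0 ≤ lo) (h1 : lo ≤ hi)
    (h2 : hi < (Bs.length : Int)) :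
    PySem.List.pyGetD ((Bs.drop lo.toNat).take (hi + 1 - lo).toNat) (-1) 0
      = PySem.List.pyGetD Bs hi 0 := by
  have hk : (hi + 1 - lo).toNat ≤ (Bs.drop lo.toNat).length := by
    simp only [List.length_drop]; omega
  have hne : ((Bs.drop lo.toNat).take (hi + 1 - lo).toNat) ≠ [] := by
    have : ((Bs.drop lo.toNat).take (hi + 1 - lo).toNat).length = (hi + 1 - lo).toNat := by
      simp only [List.length_take, List.length_drop]; omega
    intro hcontra
    rw [hcontra] at this
    simp at this; omega
  rw [PySem.List.pyGetD_neg_one _ _ hne,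
      PySem.List.pyGetD_eq_getElem Bs 0 (by omega) h2,
      List.getLast_eq_getElem]
  simp only [List.getElem_take, List.getElem_drop]
  congr 1
  simp only [List.length_take, List.length_drop]
  omega

-- A's pop-based loop on the segment Bs[lo..hi] equals B's pointer fold
lemma loop_eq (Bs : List Int) :
    ∀ (Arev : List Int) (lo hi ans : Int), 0 ≤ lo →
      lo + Arev.length ≤ hi + 1 → hi < (Bs.length : Int) →
      solLoopA Arev ((Bs.drop lo.toNat).take (hi + 1 - lo).toNat) ans
        = (Arev.foldl (altStep Bs) (ans, lo, hi)).1 := by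
  intro Arev
  induction Arev with
  | nil => intro lo hi ans _ _ _; simp [solLoopA]
  | cons a rest ih =>
    intro lo hi ans h0 h1 h2
    have hlen : (rest.length : Int) + 1 + lo ≤ hi + 1 := by
      simp only [List.length_cons] at h1; push_cast at h1; omega
    have hseg := seg_last Bs lo hi h0 (by omega) h2
    simp only [solLoopA, List.foldl_cons, altStep, hseg]
    by_cases hw : PySem.List.pyGetD Bs hi 0 > a
    · simp only [hw, if_pos]
      have hdl : (((Bs.drop lo.toNat).take (hi + 1 - lo).toNat)).dropLast
          = (Bs.drop lo.toNat).take ((hi - 1) + 1 - lo).toNat := by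
        rw [dropLast_take_le (by simp only [List.length_drop]; omega)]
        congr 1; omega
      rw [hdl]
      exact ih lo (hi - 1) (ans + 1) h0 (by omega) (by omega)
    · simp only [hw, if_neg, not_false_iff]
      have htl : (((Bs.drop lo.toNat).take (hi + 1 - lo).toNat)).tail
          = (Bs.drop (lo + 1).toNat).take (hi + 1 - (lo + 1)).toNat := by
        rw [← List.drop_one, List.drop_take, List.drop_drop]
        congr 1
        · omega
        · congr 1; omega
      rw [htl]
      exact ih (lo + 1) hi ans (by omega) (by omega) h2

-- ===== VERDICT (by name: the statement is the Claim_ definition above) =====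
theorem solution_spec : Claim_equal_solution := by
  intro A B _ hpre
  unfold Spec_solution solution solution_alt
  set As := PySem.List.sorted A (fun x => x) false with hAs
  set Bs := PySem.List.sorted B (fun x => x) false with hBs
  have hlenA : As.length = A.length := PySem.List.length_sorted ..
  have hlenB : Bs.length = B.length := PySem.List.length_sorted ..
  have h := loop_eq Bs As.reverse 0 ((Bs.length : Int) - 1) 0 (by omega)
    (by simp only [List.length_reverse, hlenA]; unfold Pre_solution at hpre; omega)
    (by omega)
  simp only [Int.toNat_zero, List.drop_zero, sub_add_cancel, sub_zero, Int.toNat_natCast,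
    List.take_length] at h
  simp only [PySem.List.len_eq]
  exact h
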